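-- pv_equiv track=rewrite | github.com/ngoclamdhtn/iMath | D10_C1.py | find_subsets_and_count
-- ===== SOURCE A (Python) =====
-- from itertools import chain, combinations
--
-- def all_subsets(s):
--     return chain.from_iterable(combinations(s, r) for r in range(len(s) + 1))
--
-- def find_subsets_and_count(A, B):
--     subsets_of_B = list(all_subsets(B))
--     valid_subsets = []
--
--     for subset in subsets_of_B:
--         if set(A).issubset(subset):  # Kiểm tra nếu A là tập hợp con của X
--             valid_subsets.append(set(subset))
--
--     count = len(valid_subsets)  # Đếm số tập hợp con hợp lệ
--     return count
-- ===== SOURCE B (Python) =====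
-- def find_subsets_and_count(A, B):
--     # closed form: each distinct required value v must appear (2**c - 1 ways
--     # among its c copies in B); every other position of B is free (2 ways).
--     res = 1
--     free = len(B)
--     for v in dict.fromkeys(A):
--         c = B.count(v)
--         if c == 0:
--             return 0
--         res *= 2 ** c - 1
--         free -= c
--     return res * 2 ** free
-- ===== Notes on version B (the rewrite author's own statement) =====
-- stated objective: faster
-- what changed: replaces the enumeration of all 2^|B| combinations of B with a counting closed form: product over the distinct values of A of (2^count-1), times 2^(number of remaining positions of B), or 0 if some value of A is missing from B
import Mathlib
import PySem

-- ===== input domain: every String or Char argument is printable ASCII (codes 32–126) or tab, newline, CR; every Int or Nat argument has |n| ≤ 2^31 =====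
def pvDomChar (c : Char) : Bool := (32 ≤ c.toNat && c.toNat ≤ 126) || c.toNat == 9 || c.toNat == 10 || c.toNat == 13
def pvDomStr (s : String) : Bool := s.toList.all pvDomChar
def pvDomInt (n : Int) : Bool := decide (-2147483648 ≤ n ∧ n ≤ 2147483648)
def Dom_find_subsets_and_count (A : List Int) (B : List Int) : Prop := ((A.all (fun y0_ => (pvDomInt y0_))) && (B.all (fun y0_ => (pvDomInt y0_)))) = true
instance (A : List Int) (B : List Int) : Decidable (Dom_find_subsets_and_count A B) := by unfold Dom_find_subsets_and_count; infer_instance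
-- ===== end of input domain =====

-- B replaces A's enumeration of all 2^|B| combinations with a counting closed form (objective: faster).

-- ===== PORT A =====
-- itertools.combinations(s, r): all length-r subsequences of s
def pvCombos : Nat → List Int → List (List Int)
  | 0, _ => [[]]
  | _ + 1, [] => []
  | r + 1, x :: xs => ((pvCombos r xs).map (fun t => x :: t)) ++ pvCombos (r + 1) xs

def all_subsets (s : List Int) : List (List Int) :=
  (PySem.List.pyRange 0 ((s.length : Int) + 1) 1).flatMap (fun r => pvCombos r.toNat s)

def find_subsets_and_count (A : List Int) (B : List Int) : Int :=
  let subsets_of_B := all_subsets B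
  let valid_subsets := subsets_of_B.foldl
    (fun acc subset =>
      if PySem.Set.issubset (PySem.Set.ofList A) subset then acc ++ [PySem.Set.ofList subset] else acc)
    ([] : List (List Int))
  ((valid_subsets.length : Int))

-- ===== PORT B =====
-- 'for v in dict.fromkeys(A): c = B.count(v); if c == 0: return 0; res *= 2**c - 1; free -= c'
def pvAltLoop (B : List Int) : List Int → Int → Nat → Int
  | [], res, free => res * 2 ^ free
  | v :: rest, res, free =>
    let c := B.count v
    if c = 0 then 0 else pvAltLoop B rest (res * (2 ^ c - 1)) (free - c)

def find_subsets_and_count_alt (A : List Int) (B : List Int) : Int :=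
  pvAltLoop B (PySem.List.dedup A) 1 B.length

-- ===== PRECONDITION & SPEC =====
def Spec_find_subsets_and_count (A : List Int) (B : List Int) (out : Int) : Prop := out = find_subsets_and_count_alt A B
instance (A : List Int) (B : List Int) (out : Int) : Decidable (Spec_find_subsets_and_count A B out) := by unfold Spec_find_subsets_and_count; infer_instance

-- ===== CLAIM (what is proved, stated in full; the proofs are below) =====
def Claim_equal_find_subsets_and_count : Prop := ∀ (A : List Int) (B : List Int), Dom_find_subsets_and_count A B → Spec_find_subsets_and_count A B (find_subsets_and_count A B)

-- ===== LEMMAS AND PROOFS =====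

-- predicate "every element of D occurs in s"
def pvGood (D : List Int) (s : List Int) : Bool := D.all (fun d => s.contains d)

-- the count of subsequences of B satisfying p, as a structural recursion on B
def pvG : List Int → (List Int → Bool) → Nat
  | [], p => if p [] then 1 else 0
  | b :: B, p => pvG B p + pvG B (fun s => p (b :: s))

-- the closed form
def pvCf (B D : List Int) : Nat :=
  if D.all (fun d => B.contains d)
  then (D.map (fun d => 2 ^ B.count d - 1)).prod * 2 ^ (B.length - (D.map (fun d => B.count d)).sum)
  else 0

-- A's per-length enumeration, summed
def pvS (B : List Int) (p : List Int → Bool) : Nat :=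
  ((List.range (B.length + 1)).map (fun k => (pvCombos k B).countP p)).sum

theorem pvCombos_big : ∀ (r : Nat) (B : List Int), B.length < r → pvCombos r B = [] := by
  intro r B
  induction B generalizing r with
  | nil => intro h; match r, h with | r + 1, _ => rfl
  | cons x xs ih =>
    intro h
    match r, h with
    | r + 1, h =>
      simp only [pvCombos]
      rw [ih r (by simpa using h), ih (r + 1) (by simp at h ⊢; omega)]
      rfl

theorem pvG_congr (B : List Int) : ∀ (p q : List Int → Bool), (∀ s, p s = q s) → pvG B p = pvG B q := by
  induction B with
  | nil => intro p q h; simp [pvG, h]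
  | cons b B ih => intro p q h; simp only [pvG]; rw [ih p q h, ih _ _ (fun s => h (b :: s))]

theorem pvGood_cons (D : List Int) (b : Int) (s : List Int) :
    pvGood D (b :: s) = pvGood (D.filter (fun d => d != b)) s := by
  rw [Bool.eq_iff_iff]
  simp only [pvGood, List.all_eq_true, List.mem_filter, List.contains_eq_mem,
    List.mem_cons, decide_eq_true_eq, bne_iff_ne]
  constructor
  · intro h d hd; rcases h d hd.1 with h1 | h1
    · exact absurd h1 hd.2
    · exact h1
  · intro h d hd
    by_cases hb : d = b
    · exact Or.inl hb
    · exact Or.inr (h d ⟨hd, hb⟩)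

theorem pvS_cons (b : Int) (B : List Int) (p : List Int → Bool) :
    pvS (b :: B) p = pvS B p + pvS B (fun s => p (b :: s)) := by
  have hsplit : ∀ k : Nat,
      (pvCombos (k + 1) (b :: B)).countP p
        = (pvCombos k B).countP (fun s => p (b :: s)) + (pvCombos (k + 1) B).countP p := by
    intro k
    simp [pvCombos, List.countP_append, List.countP_map, Function.comp_def]
  have hlast : (pvCombos (B.length + 1) B).countP p = 0 := by
    rw [pvCombos_big _ _ (by omega)]; rfl
  have hS : ∀ q : List Int → Bool, pvS B q
      = (pvCombos 0 B).countP q + ((List.range B.length).map (fun k => (pvCombos (k + 1) B).countP q)).sum := by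
    intro q
    unfold pvS
    rw [List.range_succ_eq_map]
    simp [List.map_map, Function.comp_def, Nat.succ_eq_add_one]
  unfold pvS
  simp only [List.length_cons]
  rw [List.range_succ_eq_map]
  simp only [List.map_cons, List.sum_cons, List.map_map, Function.comp_def, Nat.succ_eq_add_one]
  have hadd : ((List.range (B.length + 1)).map (fun k => (pvCombos (k + 1) (b :: B)).countP p)).sum
      = ((List.range (B.length + 1)).map (fun k => (pvCombos k B).countP (fun s => p (b :: s)))).sum
        + ((List.range (B.length + 1)).map (fun k => (pvCombos (k + 1) B).countP p)).sum := by
    rw [← List.sum_map_add]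
    exact congrArg List.sum (List.map_congr_left fun k _ => hsplit k)
  rw [hadd]
  have htail : ((List.range (B.length + 1)).map (fun k => (pvCombos (k + 1) B).countP p)).sum
      = ((List.range B.length).map (fun k => (pvCombos (k + 1) B).countP p)).sum := by
    rw [List.range_succ, List.map_append, List.sum_append]
    simp [hlast]
  rw [htail]
  have h0 : (pvCombos 0 (b :: B)).countP p = (pvCombos 0 B).countP p := by simp [pvCombos]
  have h1 := hS p
  unfold pvS at h1
  rw [h0, h1]
  omega

theorem pvG_eq_pvS (B : List Int) : ∀ p, pvG B p = pvS B p := by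
  induction B with
  | nil => intro p; simp [pvG, pvS, pvCombos, List.countP_cons]
  | cons b B ih =>
    intro p
    show pvG B p + pvG B (fun s => p (b :: s)) = _
    rw [pvS_cons, ih, ih]

theorem pvSum_counts_le (B : List Int) : ∀ (D : List Int), D.Nodup →
    (D.map (fun d => B.count d)).sum ≤ B.length := by
  induction B with
  | nil => intro D _; simp
  | cons b B ih =>
    intro D hD
    have h1 : (D.map (fun d => (b :: B).count d)).sum
        = (D.map (fun d => B.count d)).sum + (D.map (fun d => if (b == d) = true then 1 else 0)).sum := by
      rw [← List.sum_map_add]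
      congr 1
      exact List.map_congr_left fun d _ => List.count_cons
    have h2 : ∀ D : List Int, (D.map (fun d => if (b == d) = true then 1 else 0)).sum = D.count b := by
      intro D
      induction D with
      | nil => rfl
      | cons d D ihD =>
        simp only [List.map_cons, List.sum_cons, List.count_cons, ihD]
        rcases eq_or_ne b d with h | h
        · subst h; simp; omega
        · simp [h, Ne.symm h]
    have h3 : D.count b ≤ 1 := List.nodup_iff_count_le_one.mp hD b
    have h4 := ih D hD
    simp only [h1, h2, List.length_cons]
    omega

theorem pvAll_congr_mem {l : List Int} {p q : Int → Bool} (h : ∀ a ∈ l, p a = q a) :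
    l.all p = l.all q := by
  induction l with
  | nil => rfl
  | cons a l ih => simp_all

theorem pvCf_cons (b : Int) (B : List Int) (D : List Int) (hD : D.Nodup) :
    pvCf (b :: B) D = pvCf B D + pvCf B (D.filter (fun d => d != b)) := by
  by_cases hb : b ∈ D
  · -- b ∈ D
    set E := D.filter (fun d => d != b) with hEdef
    have hEmem : ∀ x, x ∈ E ↔ x ∈ D ∧ x ≠ b := by
      intro x; simp [hEdef, List.mem_filter, bne_iff_ne]
    have hbE : b ∉ E := by simp [hEmem]
    have hEnodup : E.Nodup := hD.filter _
    have hperm : D.Perm (b :: E) := by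
      rw [List.perm_ext_iff_of_nodup hD (List.nodup_cons.mpr ⟨hbE, hEnodup⟩)]
      intro x
      simp only [List.mem_cons, hEmem]
      constructor
      · intro hx; by_cases hxb : x = b
        · exact Or.inl hxb
        · exact Or.inr ⟨hx, hxb⟩
      · rintro (rfl | ⟨hx, _⟩) <;> [exact hb; exact hx]
    have hcntE : ∀ d ∈ E, (b :: B).count d = B.count d := by
      intro d hd
      rw [List.count_cons]
      simp [show ¬(b = d) from fun h => ((hEmem d).mp hd).2 h.symm]
    have hprodD : ∀ f : Int → Nat, (D.map f).prod = f b * (E.map f).prod := by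
      intro f; rw [(hperm.map f).prod_eq]; simp
    have hsumD : ∀ f : Int → Nat, (D.map f).sum = f b + (E.map f).sum := by
      intro f; rw [(hperm.map f).sum_eq]; simp
    by_cases hcE : E.all (fun d => B.contains d) = true
    · -- every other needed value is present in B
      have hcA : (D.all fun d => (b :: B).contains d) = true := by
        simp only [List.all_eq_true] at hcE ⊢
        intro d hd
        by_cases hdb : d = b
        · subst hdb; simp
        · have := hcE d ((hEmem d).mpr ⟨hd, hdb⟩)
          simp_all
      have hSD : (D.map (fun d => B.count d)).sum ≤ B.length := pvSum_counts_le B D hD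
      have hsum' : (D.map (fun d => B.count d)).sum = B.count b + (E.map (fun d => B.count d)).sum :=
        hsumD _
      set c := B.count b with hc
      set PE := (E.map (fun d => 2 ^ B.count d - 1)).prod with hPE
      set SE := (E.map (fun d => B.count d)).sum with hSE
      set n := B.length with hn
      have hprodA : ((b :: B).count b) = c + 1 := List.count_cons_self
      have hmapE1 : List.map (fun d => 2 ^ (b :: B).count d - 1) E = List.map (fun d => 2 ^ B.count d - 1) E :=
        List.map_congr_left fun d hd => by rw [hcntE d hd]
      have hmapE2 : List.map (fun d => (b :: B).count d) E = List.map (fun d => B.count d) E :=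
        List.map_congr_left fun d hd => by rw [hcntE d hd]
      have hprodD' : (D.map (fun d => 2 ^ (b :: B).count d - 1)).prod = (2 ^ (c + 1) - 1) * PE := by
        rw [hprodD, hmapE1, hprodA]
      have hsumA : (D.map (fun d => (b :: B).count d)).sum = (c + 1) + SE := by
        rw [hsumD, hmapE2, hprodA]
      unfold pvCf
      rw [if_pos hcA, if_pos hcE, hprodD', hsumA]
      by_cases hbB : b ∈ B
      · have hcpos : 0 < c := List.count_pos_iff.mpr hbB
        have hcD : (D.all fun d => B.contains d) = true := by
          simp only [List.all_eq_true] at hcE ⊢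
          intro d hd
          by_cases hdb : d = b
          · subst hdb; simpa using hbB
          · exact hcE d ((hEmem d).mpr ⟨hd, hdb⟩)
        rw [if_pos hcD, hprodD (fun d => 2 ^ B.count d - 1), hsum']
        have hble : c + SE ≤ n := by omega
        have hb1 : n + 1 - (c + 1 + SE) = n - (c + SE) := by omega
        have hb2 : n - SE = c + (n - (c + SE)) := by omega
        have h2c : (2 : ℕ) ^ (c + 1) = 2 ^ c + 2 ^ c := by rw [pow_succ]; ring
        have h1le : 1 ≤ (2 : ℕ) ^ c := Nat.one_le_two_pow
        have h3 : (2 : ℕ) ^ (c + 1) - 1 = (2 ^ c - 1) + 2 ^ c := by omega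
        simp only [List.length_cons, ← hc, ← hPE, ← hSE, ← hn]
        rw [hb1, h3, hb2, pow_add]
        generalize (2 : ℕ) ^ c - 1 = a
        ring
      · have hc0 : c = 0 := List.count_eq_zero.mpr hbB
        have hcD : ¬ (D.all fun d => B.contains d) = true := by
          simp only [List.all_eq_true]
          intro h
          exact hbB (by simpa using h b hb)
        rw [if_neg hcD]
        have hSEn : SE ≤ n := by omega
        simp only [hc0, List.length_cons]
        have : n + 1 - (0 + 1 + SE) = n - SE := by omega
        rw [this]
        simp only [← hPE, ← hSE, ← hn]
        norm_num
    · -- some other needed value is missing from B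
      have hcA : ¬ (D.all fun d => (b :: B).contains d) = true := by
        simp only [List.all_eq_true] at hcE ⊢
        intro h
        apply hcE
        intro d hd
        have h1 := h d ((hEmem d).mp hd).1
        have h2 := ((hEmem d).mp hd).2
        simp only [List.contains_cons] at h1
        simp_all [List.contains_eq_mem]
      have hcD : ¬ (D.all fun d => B.contains d) = true := by
        simp only [List.all_eq_true] at hcE ⊢
        intro h
        exact hcE fun d hd => h d ((hEmem d).mp hd).1
      unfold pvCf
      rw [if_neg hcA, if_neg hcD, if_neg hcE]
  · -- b ∉ D
    have hE : D.filter (fun d => d != b) = D :=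
      List.filter_eq_self.mpr fun d hd => by
        simp only [bne_iff_ne, ne_eq]
        exact fun h => hb (h ▸ hd)
    have hcnt : D.map (fun d => (b :: B).count d) = D.map (fun d => B.count d) :=
      List.map_congr_left fun d hd => by
        rw [List.count_cons]
        simp [show ¬(b = d) from fun h => hb (h ▸ hd)]
    have hcnt2 : D.map (fun d => 2 ^ (b :: B).count d - 1) = D.map (fun d => 2 ^ B.count d - 1) :=
      List.map_congr_left fun d hd => by
        rw [List.count_cons]
        simp [show ¬(b = d) from fun h => hb (h ▸ hd)]
    have hcond : (D.all fun d => (b :: B).contains d) = (D.all fun d => B.contains d) :=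
      pvAll_congr_mem fun d hd => by
        simp only [List.contains_cons]
        simp [show ¬(d = b) from fun h => hb (h ▸ hd)]
    unfold pvCf
    rw [hE, hcond, hcnt, hcnt2]
    split_ifs with h
    · have hS := pvSum_counts_le B D hD
      simp only [List.length_cons]
      rw [show B.length + 1 - (D.map (fun d => B.count d)).sum
            = (B.length - (D.map (fun d => B.count d)).sum) + 1 by omega, pow_succ]
      ring
    · simp

theorem pvG_good (B : List Int) : ∀ (D : List Int), D.Nodup → pvG B (pvGood D) = pvCf B D := by
  induction B with
  | nil =>
    intro D hD
    cases D with
    | nil => simp [pvG, pvGood, pvCf]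
    | cons d D => simp [pvG, pvGood, pvCf]
  | cons b B ih =>
    intro D hD
    show pvG B (pvGood D) + pvG B (fun s => pvGood D (b :: s)) = _
    rw [pvG_congr B _ _ (fun s => pvGood_cons D b s), ih D hD, ih _ (hD.filter _),
      pvCf_cons b B D hD]

theorem pvAltLoop_eq (B : List Int) : ∀ (D : List Int) (res : Int) (free : Nat), D.Nodup →
    (D.map (fun d => B.count d)).sum ≤ free →
    pvAltLoop B D res free =
      res * (if D.all (fun d => B.contains d)
             then (D.map (fun d => (2 : Int) ^ B.count d - 1)).prod * 2 ^ (free - (D.map (fun d => B.count d)).sum)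
             else 0) := by
  intro D
  induction D with
  | nil => intro res free _ _; simp [pvAltLoop]
  | cons v rest ih =>
    intro res free hnd hsum
    simp only [pvAltLoop]
    by_cases hc : B.count v = 0
    · rw [if_pos hc]
      have hnv : B.contains v = false := by
        simp only [List.contains_eq_mem, decide_eq_false_iff_not]
        exact List.count_eq_zero.mp hc
      rw [show ((v :: rest).all fun d => B.contains d) = false by
        simp only [List.all_cons, hnv, Bool.false_and]]
      simp
    · rw [if_neg hc]
      have hvB : B.contains v = true := by
        simp only [List.contains_eq_mem, decide_eq_true_eq]
        exact List.count_pos_iff.mp (Nat.pos_of_ne_zero hc)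
      have hsum0 : B.count v + (rest.map (fun d => B.count d)).sum ≤ free := by
        simpa using hsum
      have hsum' : (rest.map (fun d => B.count d)).sum ≤ free - B.count v := by omega
      rw [ih (res * (2 ^ B.count v - 1)) (free - B.count v) hnd.of_cons hsum']
      simp only [List.all_cons, hvB, Bool.true_and, List.map_cons, List.sum_cons, List.prod_cons]
      split_ifs with h
      · have hexp : free - B.count v - (rest.map (fun d => B.count d)).sum
            = free - (B.count v + (rest.map (fun d => B.count d)).sum) := by omega
        rw [hexp]
        ring
      · ring

theorem pvCf_cast (B D : List Int) :
    ((pvCf B D : Nat) : Int) =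
      if D.all (fun d => B.contains d)
      then (D.map (fun d => (2 : Int) ^ B.count d - 1)).prod * 2 ^ (B.length - (D.map (fun d => B.count d)).sum)
      else 0 := by
  unfold pvCf
  split_ifs with h
  · rw [Nat.cast_mul, Nat.cast_pow, Nat.cast_list_prod, List.map_map]
    norm_num
    congr 1
    apply List.map_congr_left
    intro d _
    simp only [Function.comp_apply]
    rw [Nat.cast_sub Nat.one_le_two_pow]
    push_cast
    ring
  · simp

theorem pvA_eq (A B : List Int) :
    find_subsets_and_count A B = ((pvS B (pvGood (PySem.List.dedup A)) : Nat) : Int) := by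
  unfold find_subsets_and_count
  dsimp only
  rw [PySem.List.foldl_append_if]
  simp only [List.nil_append, List.length_map]
  rw [← List.countP_eq_length_filter]
  congr 1
  unfold all_subsets pvS
  have hr : ((B.length : Int) + 1) = ((B.length + 1 : Nat) : Int) := by push_cast; ring
  rw [hr, PySem.List.pyRange_zero_nat, List.flatMap_map, List.countP_flatMap]
  simp only [Function.comp_def, Int.toNat_natCast, PySem.List.dedup_eq_ofList]
  rfl

-- ===== VERDICT (by name: the statement is the Claim_ definition above) =====
theorem find_subsets_and_count_spec : Claim_equal_find_subsets_and_count := by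
  intro A B _
  unfold Spec_find_subsets_and_count
  rw [pvA_eq, ← pvG_eq_pvS, pvG_good B (PySem.List.dedup A)
        (by simp [PySem.List.dedup_eq_ofList, PySem.Set.nodup_ofList]),
      pvCf_cast, find_subsets_and_count_alt,
      pvAltLoop_eq B (PySem.List.dedup A) 1 B.length
        (by simp [PySem.List.dedup_eq_ofList, PySem.Set.nodup_ofList])
        (pvSum_counts_le B _ (by simp [PySem.List.dedup_eq_ofList, PySem.Set.nodup_ofList])),
      one_mul]
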